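-- pv_equiv track=rewrite | github.com/Sanghyeok-Jeon/Algorithms_Python | 백준/Silver/24039. 2021은 무엇이 특별할까？/2021은 무엇이 특별할까？.py | find_next_special_number
-- ===== SOURCE A (Python) =====
-- import math
--
-- def is_prime(num):
--     if num < 2:
--         return False
--     for i in range(2, int(math.sqrt(num)) + 1):
--         if num % i == 0:
--             return False
--     return True
--
-- def find_next_special_number(n):
--     primes = []
--     limit = 11000
--     for i in range(2, limit):
--         if is_prime(i):
--             primes.append(i)
--
--     for i in range(len(primes) - 1):
--         product = primes[i] * primes[i + 1]
--         if product > n: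
--             return product
-- ===== SOURCE B (Python) =====
-- def find_next_special_number(n):
--     limit = 11000
--     nums = list(range(2, limit))
--     primes = []
--     while nums and nums[0] * nums[0] < limit:
--         p = nums[0]
--         primes.append(p)
--         nums = [x for x in nums[1:] if x % p != 0]
--     primes += nums
--     for p, q in zip(primes, primes[1:]):
--         if p * q > n:
--             return p * q
--     return None
-- ===== Notes on version B (the rewrite author's own statement) =====
-- stated objective: faster
-- what changed: Replaces per-number trial division (sqrt-bounded loop for each of the 11000 candidates) with an Eratosthenes-style sieve that repeatedly filters the multiples of the head prime out of the candidate list, then scans consecutive-prime pairs via zip instead of index arithmetic.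
import Mathlib
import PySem

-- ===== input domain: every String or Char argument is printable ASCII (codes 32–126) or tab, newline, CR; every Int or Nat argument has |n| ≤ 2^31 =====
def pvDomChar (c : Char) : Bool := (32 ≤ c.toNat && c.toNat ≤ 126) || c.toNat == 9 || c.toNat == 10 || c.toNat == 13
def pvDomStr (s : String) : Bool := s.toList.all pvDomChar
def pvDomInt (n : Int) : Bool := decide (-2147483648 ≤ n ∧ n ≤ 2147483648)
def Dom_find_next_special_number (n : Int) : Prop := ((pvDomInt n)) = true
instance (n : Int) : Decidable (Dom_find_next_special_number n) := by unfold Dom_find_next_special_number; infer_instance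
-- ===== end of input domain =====

-- B replaces A's per-number trial division with an Eratosthenes-style sieve that repeatedly
-- filters the multiples of the head prime out of the candidate list (measured faster in Python);
-- the return value is proved equal for every n.

-- ===== PORT A =====

-- int(math.sqrt(num)) : exact integer square root for every num reached here (num < 11000,
-- where double sqrt truncates to the integer square root); computed by a fuel-bounded climb.
def isqrtGo (n : Nat) : Nat → Nat → Nat
  | 0, acc => acc
  | fuel + 1, acc => if (acc + 1) * (acc + 1) ≤ n then isqrtGo n fuel (acc + 1) else acc

def isqrt (n : Nat) : Nat := isqrtGo n n 0

def is_prime (num : Int) : Bool :=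
  if num < 2 then false
  else
    -- for i in range(2, int(math.sqrt(num)) + 1): if num % i == 0: return False / return True
    (PySem.List.pyRange 2 ((isqrt num.toNat : Int) + 1) 1).all
      (fun i => !(PySem.Int.mod num i == 0))

def primesA : List Int :=
  (PySem.List.pyRange 2 11000 1).foldl
    (fun acc i => if is_prime i then acc ++ [i] else acc) []

-- for i in range(len(primes) - 1): … (primes[i] indices are always in range here,
-- so pyGetD with default 0 is exact)
def loopA (primes : List Int) (n : Int) : List Int → Option Int
  | [] => none
  | i :: rest =>
    let product := PySem.List.pyGetD primes i 0 * PySem.List.pyGetD primes (i + 1) 0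
    if product > n then some product else loopA primes n rest

def find_next_special_number (n : Int) : Option Int :=
  loopA primesA n (PySem.List.pyRange 0 ((primesA.length : Int) - 1) 1)

-- ===== PORT B =====

-- while nums and nums[0]*nums[0] < limit: keep the head as a prime, filter its
-- multiples out of the rest; the fuel only makes the same loop structurally total
-- (nums is strictly shorter on every iteration, and starts shorter than 11000).
def sieveLoop (fuel : Nat) (primes nums : List Int) : List Int :=
  match fuel, nums with
  | 0, _ => primes ++ nums
  | _ + 1, [] => primes ++ []
  | fuel + 1, p :: rest =>
    if p * p < 11000 then
      sieveLoop fuel (primes ++ [p]) (rest.filter (fun x => !(PySem.Int.mod x p == 0)))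
    else primes ++ p :: rest

def primesB : List Int := sieveLoop 11000 [] (PySem.List.pyRange 2 11000 1)

-- for p, q in zip(primes, primes[1:]): if p*q > n: return p*q / return None
def loopB (n : Int) : List (Int × Int) → Option Int
  | [] => none
  | (p, q) :: rest => if p * q > n then some (p * q) else loopB n rest

def find_next_special_number_alt (n : Int) : Option Int :=
  loopB n (primesB.zip (PySem.List.slice primesB (some 1) none))

-- ===== PRECONDITION & SPEC =====
def Spec_find_next_special_number (n : Int) (out : Option Int) : Prop := out = find_next_special_number_alt n
instance (n : Int) (out : Option Int) : Decidable (Spec_find_next_special_number n out) := by unfold Spec_find_next_special_number; infer_instance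

-- ===== CLAIM (what is proved, stated in full; the proofs are below) =====
def Claim_equal_find_next_special_number : Prop := ∀ (n : Int), Dom_find_next_special_number n → Spec_find_next_special_number n (find_next_special_number n)

-- ===== LEMMAS AND PROOFS =====

theorem isqrtGo_eq (n : Nat) : ∀ (fuel acc : Nat), acc ≤ Nat.sqrt n → Nat.sqrt n ≤ acc + fuel →
    isqrtGo n fuel acc = Nat.sqrt n := by
  intro fuel
  induction fuel with
  | zero => intro acc h1 h2; simp [isqrtGo]; omega
  | succ f ih =>
    intro acc h1 h2
    simp only [isqrtGo]
    by_cases h : (acc + 1) * (acc + 1) ≤ n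
    · rw [if_pos h]
      exact ih (acc + 1) (Nat.le_sqrt.mpr h) (by omega)
    · rw [if_neg h]
      have := Nat.sqrt_lt.mpr (by omega : n < (acc + 1) * (acc + 1))
      omega

theorem isqrt_eq (n : Nat) : isqrt n = Nat.sqrt n :=
  isqrtGo_eq n n 0 (Nat.zero_le _) (by simpa using Nat.sqrt_le_self n)

theorem int_dvd_iff (a b : Int) (ha : 0 ≤ a) (hb : 0 ≤ b) : a ∣ b ↔ a.toNat ∣ b.toNat := by
  have h := Int.natCast_dvd_natCast (m := a.toNat) (n := b.toNat)
  rw [Int.toNat_of_nonneg ha, Int.toNat_of_nonneg hb] at h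
  exact h

theorem prime_dvd_prime (p x : Int) (hp2 : 2 ≤ p) (hx : Nat.Prime x.toNat) (hd : p ∣ x) :
    p = x := by
  have hx2 := hx.two_le
  have h1 : p.toNat ∣ x.toNat := (int_dvd_iff p x (by omega) (by omega)).mp hd
  rcases hx.eq_one_or_self_of_dvd _ h1 with h | h <;> omega

-- A's trial division decides exactly primality of num.toNat (for 2 ≤ num).
theorem is_prime_iff (x : Int) (hx : 2 ≤ x) : is_prime x = true ↔ Nat.Prime x.toNat := by
  rw [is_prime, if_neg (by omega), List.all_eq_true, isqrt_eq, Nat.prime_def_le_sqrt]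
  constructor
  · intro h
    refine ⟨by omega, ?_⟩
    intro m hm2 hms hdvd
    have hmem : (m : Int) ∈ PySem.List.pyRange 2 ((Nat.sqrt x.toNat : Int) + 1) 1 := by
      rw [PySem.List.mem_pyRange_one]
      constructor <;> omega
    have h2 := h _ hmem
    simp only [Bool.not_eq_true', beq_eq_false_iff_ne, ne_eq,
      PySem.Int.mod_eq_zero_iff_dvd] at h2
    exact h2 ((int_dvd_iff _ _ (by omega) (by omega)).mpr (by simpa using hdvd))
  · rintro ⟨-, h⟩ i hi
    rw [PySem.List.mem_pyRange_one] at hi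
    simp only [Bool.not_eq_true', beq_eq_false_iff_ne, ne_eq,
      PySem.Int.mod_eq_zero_iff_dvd]
    intro hdvd
    exact h i.toNat (by omega) (by omega) ((int_dvd_iff _ _ (by omega) (by omega)).mp hdvd)

-- the primes list A builds is the range filtered by is_prime
theorem primesA_eq : primesA = (PySem.List.pyRange 2 11000 1).filter is_prime := by
  unfold primesA
  simpa using PySem.List.foldl_append_if_eq_filter is_prime (PySem.List.pyRange 2 11000 1) []

theorem filter_sub (p : Int) (l : List Int)
    (hl : ∀ x ∈ l, is_prime x = true → ¬ p ∣ x) :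
    (l.filter (fun x => !(PySem.Int.mod x p == 0))).filter is_prime = l.filter is_prime := by
  induction l with
  | nil => rfl
  | cons a t ih =>
    have ht : ∀ x ∈ t, is_prime x = true → ¬ p ∣ x := fun x hx => hl x (List.mem_cons_of_mem _ hx)
    have hmod : (PySem.Int.mod a p == 0) = decide (p ∣ a) := by
      by_cases hpa : p ∣ a <;>
        simp [beq_iff_eq, PySem.Int.mod_eq_zero_iff_dvd, hpa]
    by_cases hpa : p ∣ a
    · have ha : ¬ is_prime a = true := fun h => hl a List.mem_cons_self h hpa
      simp [hmod, hpa, ha, ih ht]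
    · simp [List.filter_cons, hmod, hpa, ih ht]

-- the sieve returns primes ++ (the primes among nums), under the loop invariant
theorem sieve_correct (fuel : Nat) : ∀ (primes nums : List Int),
    nums.length ≤ fuel →
    nums.Pairwise (· < ·) →
    (∀ x ∈ nums, 2 ≤ x ∧ x < 11000) →
    (∀ q : Int, 2 ≤ q → q < 11000 → Nat.Prime q.toNat → q ∈ nums ∨ ∀ x ∈ nums, ¬ q ∣ x) →
    sieveLoop fuel primes nums = primes ++ nums.filter is_prime := by
  induction fuel with
  | zero =>
    intro primes nums hlen _ _ _
    have : nums = [] := List.length_eq_zero_iff.mp (by omega)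
    subst this; rfl
  | succ f ih =>
    intro primes nums hlen hpw hbd hinv
    cases nums with
    | nil => rfl
    | cons p rest =>
      have hp2 : 2 ≤ p := (hbd p List.mem_cons_self).1
      have hpP : Nat.Prime p.toNat := by
        by_contra hnp
        have hq_prime : Nat.Prime p.toNat.minFac := Nat.minFac_prime (by omega)
        have hq_dvd : ((p.toNat.minFac : Nat) : Int) ∣ p :=
          (int_dvd_iff _ _ (by omega) (by omega)).mpr (by simpa using Nat.minFac_dvd p.toNat)
        have hq_ne : p.toNat.minFac ≠ p.toNat := by
          intro he
          exact hnp (Nat.prime_def_minFac.mpr ⟨by omega, he⟩)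
        have hq_le : p.toNat.minFac ≤ p.toNat := Nat.minFac_le (by omega)
        have hq2 : 2 ≤ ((p.toNat.minFac : Nat) : Int) := by
          have := hq_prime.two_le; omega
        have hq_lt11k : ((p.toNat.minFac : Nat) : Int) < 11000 := by
          have := (hbd p List.mem_cons_self).2; omega
        rcases hinv _ hq2 hq_lt11k (by simpa using hq_prime) with hmem | hnone
        · rcases List.mem_cons.mp hmem with he | hm
          · omega
          · have := (List.pairwise_cons.mp hpw).1 _ hm; omega
        · exact hnone p List.mem_cons_self hq_dvd
      have hrest_gt : ∀ x ∈ rest, p < x := (List.pairwise_cons.mp hpw).1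
      by_cases hpp : p * p < 11000
      · simp only [sieveLoop, if_pos hpp]
        have hfil : ∀ x ∈ rest, x ∈ rest.filter (fun x => !(PySem.Int.mod x p == 0)) ↔ ¬ p ∣ x := by
          intro x hxm
          rw [List.mem_filter]
          simp [hxm, PySem.Int.mod_eq_zero_iff_dvd]
        have hrec := ih (primes ++ [p]) (rest.filter (fun x => !(PySem.Int.mod x p == 0)))
          (le_trans (rest.length_filter_le _) (by simpa using hlen))
          (hpw.sublist (List.Sublist.trans List.filter_sublist (List.sublist_cons_self p rest)))
          (fun x hx => hbd x (List.mem_cons_of_mem _ (List.mem_of_mem_filter hx)))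
          ?_
        · rw [hrec, filter_sub p rest ?_]
          · have hip : is_prime p = true := (is_prime_iff p hp2).mpr hpP
            simp [hip]
          · intro x hx hxp hdvd
            have h2x : 2 ≤ x := (hbd x (List.mem_cons_of_mem _ hx)).1
            have := prime_dvd_prime p x hp2 ((is_prime_iff x h2x).mp hxp) hdvd
            have := hrest_gt x hx
            omega
        · intro q hq2 hq11 hqP
          rcases hinv q hq2 hq11 hqP with hmem | hnone
          · rcases List.mem_cons.mp hmem with he | hm
            · subst he
              right
              intro x hx
              exact ((hfil x (List.mem_of_mem_filter hx)).mp hx)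
            · left
              rw [hfil q hm]
              intro hdvd
              have := prime_dvd_prime p q hp2 hqP hdvd
              have := hrest_gt q hm
              omega
          · right
            exact fun x hx => hnone x (List.mem_cons_of_mem _ (List.mem_of_mem_filter hx))
      · simp only [sieveLoop, if_neg hpp]
        have hall : ∀ x ∈ p :: rest, is_prime x = true := by
          intro x hxm
          have hx2 : 2 ≤ x := (hbd x hxm).1
          have hx11 : x < 11000 := (hbd x hxm).2
          rw [is_prime_iff x hx2]
          by_contra hnx
          have hq_prime : Nat.Prime x.toNat.minFac := Nat.minFac_prime (by omega)
          have hq_dvd : ((x.toNat.minFac : Nat) : Int) ∣ x :=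
            (int_dvd_iff _ _ (by omega) (by omega)).mpr (by simpa using Nat.minFac_dvd x.toNat)
          have hq_sq : x.toNat.minFac * x.toNat.minFac ≤ x.toNat := by
            have := Nat.minFac_sq_le_self (by omega : 0 < x.toNat) hnx
            simpa [pow_two] using this
          have hq2 : 2 ≤ ((x.toNat.minFac : Nat) : Int) := by
            have := hq_prime.two_le; omega
          have hq_lt11k : ((x.toNat.minFac : Nat) : Int) < 11000 := by
            have := Nat.minFac_le (by omega : 0 < x.toNat); omega
          rcases hinv _ hq2 hq_lt11k (by simpa using hq_prime) with hmem | hnone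
          · have hpq : p ≤ ((x.toNat.minFac : Nat) : Int) := by
              rcases List.mem_cons.mp hmem with he | hm
              · omega
              · have := hrest_gt _ hm; omega
            have hsq : ((x.toNat.minFac : Nat) : Int) * ((x.toNat.minFac : Nat) : Int) ≤ x := by
              have : ((x.toNat.minFac * x.toNat.minFac : Nat) : Int) ≤ ((x.toNat : Nat) : Int) :=
                Int.ofNat_le.mpr hq_sq
              push_cast at this
              omega
            nlinarith
          · exact hnone x hxm hq_dvd
        rw [List.filter_eq_self.mpr hall]

set_option maxRecDepth 100000 in
theorem primesB_eq : primesB = (PySem.List.pyRange 2 11000 1).filter is_prime := by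
  unfold primesB
  rw [sieve_correct 11000 [] (PySem.List.pyRange 2 11000 1) ?_ ?_ ?_ ?_]
  · rfl
  · rw [PySem.List.length_pyRange_one]; norm_num
  · exact PySem.List.pairwise_lt_pyRange_one 2 11000
  · intro x hx
    rw [PySem.List.mem_pyRange_one] at hx
    omega
  · intro q hq2 hq11 _
    left
    rw [PySem.List.mem_pyRange_one]
    omega

theorem loop_eq_aux (n : Int) (ps : List Int) : ∀ (pre : List Int),
    loopA (pre ++ ps) n
      (PySem.List.pyRange (pre.length : Int) (((pre ++ ps).length : Int) - 1) 1)
    = loopB n (ps.zip (ps.drop 1)) := by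
  induction ps with
  | nil =>
    intro pre
    rw [PySem.List.pyRange_one_eq_nil (by simp)]
    simp [loopA, loopB]
  | cons a ps' ih =>
    intro pre
    cases ps' with
    | nil =>
      rw [PySem.List.pyRange_one_eq_nil (by simp)]
      simp [loopA, loopB]
    | cons b tl =>
      rw [PySem.List.pyRange_one_cons (by simp; omega)]
      have h1 : PySem.List.pyGetD (pre ++ a :: b :: tl) (pre.length : Int) 0 = a := by
        rw [PySem.List.pyGetD_natCast]; simp
      have h2 : PySem.List.pyGetD (pre ++ a :: b :: tl) ((pre.length : Int) + 1) 0 = b := by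
        have : ((pre.length : Int) + 1) = ((pre.length + 1 : Nat) : Int) := by push_cast; ring
        rw [this, PySem.List.pyGetD_natCast]
        simp [List.getD]
      show (let product := _ * _; if product > n then some product else _)
          = loopB n ((a :: b :: tl).zip (List.drop 1 (a :: b :: tl)))
      rw [h1, h2]
      have hz : (a :: b :: tl).zip (List.drop 1 (a :: b :: tl))
          = (a, b) :: ((b :: tl).zip (List.drop 1 (b :: tl))) := rfl
      rw [hz]
      simp only [loopB]
      by_cases hab : a * b > n
      · simp [hab]
      · simp only [hab, if_false]
        have h3 := ih (pre ++ [a])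
        have e1 : pre ++ [a] ++ b :: tl = pre ++ a :: b :: tl := by simp
        rw [e1] at h3
        have e2 : (((pre ++ [a]).length : Nat) : Int) = (pre.length : Int) + 1 := by
          simp
        rw [e2] at h3
        exact h3

-- ===== VERDICT (by name: the statement is the Claim_ definition above) =====
set_option maxRecDepth 100000 in
theorem find_next_special_number_spec : Claim_equal_find_next_special_number := by
  intro n _
  show find_next_special_number n = find_next_special_number_alt n
  unfold find_next_special_number find_next_special_number_alt
  rw [primesA_eq, primesB_eq, PySem.List.slice_from_one]
  have h := loop_eq_aux n ((PySem.List.pyRange 2 11000 1).filter is_prime) []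
  simp only [List.nil_append, List.length_nil, Nat.cast_zero, List.drop_one] at h
  rw [← List.drop_one]
  exact h
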